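-- pv_equiv track=rewrite | github.com/OrtegaSA/cqc-qhe-repo | cqc_qhe/utils.py | last_register_counts
-- ===== SOURCE A (Python) =====
-- def last_register_counts(counts):
--     """Obtain the counts only for the last classical register.
--     Args:
--         counts: Dictionary with the counts of the simulation.
--     Returns:
--         last_counts: Dictionary with the counts of the last register.
--     """
--
--     last_counts = {}
--     for key in counts:
--         last_key = key.split()[-1]
--         if last_counts.get(last_key) is None:
--             last_counts[last_key] = counts[key]
--         else:
--             last_counts[last_key] += counts[key]
--
--     return last_counts
-- ===== SOURCE B (Python) =====
-- def last_register_counts(counts):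
--     """Aggregate counts by the last whitespace-separated token of each key.
--
--     Re-implementation as staged group-by-scan: first extract the (last_token,
--     value) pairs, then list the distinct tokens in first-occurrence order
--     (dict.fromkeys), and compute each token's total with its own filtered scan
--     over the pairs -- no accumulation dict with insert-or-+= at all.
--     """
--     pairs = [(key.split()[-1], val) for key, val in counts.items()]
--     return {t: sum(v for s, v in pairs if s == t)
--             for t in dict.fromkeys(s for s, _ in pairs)}
-- ===== Notes on version B (the rewrite author's own statement) =====
-- stated objective: alternative
-- what changed: A does a single pass maintaining running totals in a dict with an insert-or-+= branch; B has no accumulator dict: it extracts the (token, value) pairs, lists the distinct tokens in first-occurrence order via dict.fromkeys, and computes each token's total by a separate filtered scan over the pairs (staged group-by-scan, O(n*k)).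
import Mathlib
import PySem

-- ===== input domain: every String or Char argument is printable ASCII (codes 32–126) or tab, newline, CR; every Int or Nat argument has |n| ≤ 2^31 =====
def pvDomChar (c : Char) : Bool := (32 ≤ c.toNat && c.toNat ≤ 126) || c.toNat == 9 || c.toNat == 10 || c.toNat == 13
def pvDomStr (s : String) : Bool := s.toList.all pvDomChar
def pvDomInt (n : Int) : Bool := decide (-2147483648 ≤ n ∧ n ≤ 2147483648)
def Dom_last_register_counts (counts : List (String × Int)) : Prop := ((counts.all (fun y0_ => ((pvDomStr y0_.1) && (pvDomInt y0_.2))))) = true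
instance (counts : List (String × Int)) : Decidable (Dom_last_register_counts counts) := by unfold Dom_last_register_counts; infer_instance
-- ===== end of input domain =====

-- B replaces A's single-pass accumulator dict by a staged group-by-scan: distinct tokens in first-occurrence order, each total computed by its own filtered scan (alternative decomposition, same results).

-- ===== PORT A =====
def last_register_counts (counts : List (String × Int)) : List (String × Int) :=
  (counts.foldl (fun last_counts kv =>
      match PySem.List.pyGet? (PySem.Str.split₀ kv.1) (-1) with
      | none => last_counts  -- Python raises IndexError here (key with no token); excluded by Pre_
      | some last_key =>
        match last_counts.get? last_key with
        | none => last_counts.insert last_key kv.2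
        | some v => last_counts.insert last_key (v + kv.2)
    ) (PySem.Dict.empty : PySem.Dict String Int)).items

-- ===== PORT B =====
def last_register_counts_alt (counts : List (String × Int)) : List (String × Int) :=
  -- pairs = [(key.split()[-1], val) …]; "" only where Python raises (outside Pre_)
  let pairs := counts.map (fun kv => ((PySem.List.pyGet? (PySem.Str.split₀ kv.1) (-1)).getD "", kv.2))
  -- dict.fromkeys = distinct tokens in first-occurrence order; each total is its own filtered scan
  (PySem.List.dedup (pairs.map (fun p => p.1))).map
    (fun t => (t, ((pairs.filter (fun p => p.1 == t)).map (fun p => p.2)).sum))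

-- ===== PRECONDITION & SPEC =====
-- Pre_ excludes keys with no whitespace-separated token (key.split() is empty, where A raises IndexError)
-- and duplicate keys (a Python dict cannot contain them, so such association lists represent no dict input).
def Pre_last_register_counts (counts : List (String × Int)) : Prop :=
  (∀ kv ∈ counts, PySem.Str.split₀ kv.1 ≠ []) ∧ (counts.map Prod.fst).Nodup
instance (counts : List (String × Int)) : Decidable (Pre_last_register_counts counts) := by unfold Pre_last_register_counts; infer_instance

def pvWitness_last_register_counts : (List (String × Int)) := [("00 11", 3), ("01 11", 2), ("10 01", 1)]

def Spec_last_register_counts (counts : List (String × Int)) (out : List (String × Int)) : Prop := out = last_register_counts_alt counts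
instance (counts : List (String × Int)) (out : List (String × Int)) : Decidable (Spec_last_register_counts counts out) := by unfold Spec_last_register_counts; infer_instance

-- ===== CLAIM (what is proved, stated in full; the proofs are below) =====
def Claim_equal_last_register_counts : Prop := ∀ (counts : List (String × Int)), Dom_last_register_counts counts → Pre_last_register_counts counts → Spec_last_register_counts counts (last_register_counts counts)

-- ===== LEMMAS AND PROOFS =====

-- A's loop step, expressed on a (token, value) pair.
def pvStepA (d : PySem.Dict String Int) (p : String × Int) : PySem.Dict String Int :=
  match d.get? p.1 with
  | none => d.insert p.1 p.2
  | some v => d.insert p.1 (v + p.2)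

-- Canonical form: grouped by token in first-occurrence order, combined by f (f = sum gives B's body).
def pvGrp {ν : Type} (f : List Int → ν) (ps : List (String × Int)) : List (String × ν) :=
  (PySem.List.dedup (ps.map (fun p => p.1))).map
    (fun t => (t, f ((ps.filter (fun p => p.1 == t)).map (fun p => p.2))))

lemma pvFind_beq (S : List String) (t : String) :
    List.find? (fun s => s == t) S = if t ∈ S then some t else none := by
  induction S with
  | nil => simp
  | cons s S ih =>
    by_cases h : s = t
    · subst h; simp
    · have hbe : (s == t) = false := by simpa using h
      simp [hbe, ih, Ne.symm h]

lemma pvGet?_mk_map {ν : Type} (S : List String) (g : String → ν) (t : String) :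
    (PySem.Dict.mk (S.map (fun s => (s, g s))) : PySem.Dict String ν).get? t
      = if t ∈ S then some (g t) else none := by
  simp only [PySem.Dict.get?, List.find?_map]
  have : ((fun p : String × ν => p.1 == t) ∘ fun s => (s, g s)) = fun s => s == t := rfl
  rw [this, pvFind_beq]
  split_ifs <;> simp

lemma pvContains_mk_map {ν : Type} (S : List String) (g : String → ν) (t : String) :
    (PySem.Dict.mk (S.map (fun s => (s, g s))) : PySem.Dict String ν).contains t
      = decide (t ∈ S) := by
  induction S with
  | nil => simp [PySem.Dict.contains]
  | cons s S ih =>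
    simp only [PySem.Dict.contains] at ih ⊢
    by_cases h : s = t
    · subst h; simp
    · have hbe : (s == t) = false := by simpa using h
      simp [hbe, ih, Ne.symm h]

-- Inserting token t with the updated combined value steps the canonical form by one pair.
lemma pvGrp_snoc {ν : Type} (f : List Int → ν) (ps : List (String × Int)) (t : String) (v : Int) :
    pvGrp f (ps ++ [(t, v)])
      = ((PySem.Dict.mk (pvGrp f ps) : PySem.Dict String ν).insert t
          (f (((ps.filter (fun p => p.1 == t)).map (fun p => p.2)) ++ [v]))).items := by
  unfold pvGrp
  have hded : PySem.List.dedup ((ps ++ [(t, v)]).map (fun p => p.1))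
      = PySem.Set.add (PySem.List.dedup (ps.map (fun p => p.1))) t := by
    simp [PySem.List.dedup, PySem.Set.ofList]
  set S := PySem.List.dedup (ps.map (fun p => p.1)) with hS
  have hmem : ∀ x, x ∈ S ↔ x ∈ ps.map (fun p => p.1) := fun x => PySem.Set.mem_ofList _ _
  have hcont := pvContains_mk_map S (fun t => f ((ps.filter (fun p => p.1 == t)).map (fun p => p.2))) t
  by_cases ht : t ∈ S
  · -- token already seen: the insert overwrites in place, the token list is unchanged
    rw [hded]
    have hadd : PySem.Set.add S t = S := by
      simp [PySem.Set.add, PySem.Set.contains, ht]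
    rw [hadd, PySem.Dict.insert, if_pos (by rw [hcont]; simpa using ht)]
    simp only [List.map_map]
    apply List.map_congr_left
    intro x hx
    by_cases hxt : x = t
    · subst hxt
      simp [List.filter_append]
    · have hbe : (t == x) = false := by simpa using Ne.symm hxt
      simp [List.filter_append, hbe, Function.comp]
      exact fun h => absurd h hxt
  · -- new token: the insert appends, the token list gains t at the end
    rw [hded]
    have htl : t ∉ ps.map (fun p => p.1) := fun h => ht ((hmem t).mpr h)
    have hadd : PySem.Set.add S t = S ++ [t] := by
      simp [PySem.Set.add, PySem.Set.contains, ht]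
    rw [hadd, PySem.Dict.insert, if_neg (by rw [hcont]; simpa using ht)]
    have hfil : List.filter (fun p => p.1 == t) ps = [] := by
      rw [List.filter_eq_nil_iff]
      intro p hp hpt
      exact htl (List.mem_map.mpr ⟨p, hp, by simpa using hpt⟩)
    rw [List.map_append]
    congr 1
    · apply List.map_congr_left
      intro x hx
      have hxt : x ≠ t := fun h => ht (h ▸ hx)
      have hbe : (t == x) = false := by simpa using Ne.symm hxt
      simp [List.filter_append, hbe]
    · simp [hfil]

lemma pvFoldA_eq_pvGrp (ps : List (String × Int)) :
    (ps.foldl pvStepA (PySem.Dict.empty : PySem.Dict String Int)).items = pvGrp List.sum ps := by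
  induction ps using List.reverseRecOn with
  | nil => simp [pvGrp, PySem.Dict.empty, PySem.List.dedup, PySem.Set.ofList, PySem.Set.empty]
  | append_singleton ps p ih =>
    obtain ⟨t, v⟩ := p
    rw [List.foldl_append, List.foldl_cons, List.foldl_nil]
    have hmk : ps.foldl pvStepA (PySem.Dict.empty : PySem.Dict String Int)
        = PySem.Dict.mk (pvGrp List.sum ps) := by
      cases hd : ps.foldl pvStepA (PySem.Dict.empty : PySem.Dict String Int) with
      | mk items => rw [← ih, hd]
    rw [hmk, pvGrp_snoc List.sum ps t v]
    set w := (ps.filter (fun p => p.1 == t)).map (fun p => p.2) with hw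
    have hget := pvGet?_mk_map (PySem.List.dedup (ps.map (fun p => p.1)))
      (fun t => List.sum ((ps.filter (fun p => p.1 == t)).map (fun p => p.2))) t
    unfold pvStepA
    rw [show PySem.Dict.mk (pvGrp List.sum ps)
        = PySem.Dict.mk ((PySem.List.dedup (ps.map (fun p => p.1))).map
            (fun t => (t, List.sum ((ps.filter (fun p => p.1 == t)).map (fun p => p.2))))) from rfl]
    rw [hget]
    by_cases ht : t ∈ PySem.List.dedup (ps.map (fun p => p.1))
    · -- existing token: A adds v to the running total; the group scan gains the trailing v
      simp only [ht, if_pos]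
      rw [show w.sum + v = (w ++ [v]).sum by simp]
    · -- new token: the group is empty, its sum is v
      have : w = [] := by
        rw [hw, List.filter_eq_nil_iff.mpr]
        · simp
        · intro p hp hpt
          exact ht ((PySem.Set.mem_ofList _ _).mpr (List.mem_map.mpr ⟨p, hp, by simpa using hpt⟩))
      simp only [ht, if_neg, not_false_iff, this]
      simp

lemma pvA_eq_foldA (counts : List (String × Int))
    (h : ∀ kv ∈ counts, PySem.Str.split₀ kv.1 ≠ []) :
    last_register_counts counts
      = ((counts.map (fun kv => ((PySem.List.pyGet? (PySem.Str.split₀ kv.1) (-1)).getD "", kv.2))).foldl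
          pvStepA (PySem.Dict.empty : PySem.Dict String Int)).items := by
  unfold last_register_counts
  rw [List.foldl_map]
  congr 1
  apply PySem.List.foldl_congr_mem
  intro d kv hkv
  have hne : PySem.Str.split₀ kv.1 ≠ [] := h kv hkv
  rw [PySem.List.pyGet?_neg_one]
  cases hl : (PySem.Str.split₀ kv.1).getLast? with
  | none => exact absurd (List.getLast?_eq_none_iff.mp hl) hne
  | some lk => simp only [Option.getD_some, pvStepA]

-- ===== VERDICT (by name: the statement is the Claim_ definition above) =====
theorem last_register_counts_spec : Claim_equal_last_register_counts := by
  intro counts _hdom hpre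
  unfold Spec_last_register_counts
  rw [pvA_eq_foldA counts hpre.1, pvFoldA_eq_pvGrp]
  rfl
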